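-- pv_equiv track=rewrite | github.com/naturallanguagepuzzling/blog | 2021-01-17-landmark_states_element.py | get_state_pairs
-- ===== SOURCE A (Python) =====
-- def get_state_pairs(my_states):
--     state_pairs = []
--     for st in my_states:
--         for ts in my_states:
--             if ts == st:
--                 pass
--             elif [ts, st] in state_pairs or [st, ts] in state_pairs:
--                 pass
--             else:
--                 state_pairs.append([st,ts])
--     return state_pairs
-- ===== SOURCE B (Python) =====
-- def _pairs(u):
--     if not u:
--         return []
--     head, rest = u[0], u[1:]
--     return [[head, y] for y in rest] + _pairs(rest)
--
-- def get_state_pairs(my_states):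
--     unique = []
--     for x in my_states:
--         if x not in unique:
--             unique.append(x)
--     return _pairs(unique)
-- ===== Notes on version B (the rewrite author's own statement) =====
-- stated objective: faster
-- what changed: B first deduplicates the input into a first-occurrence-order list, then emits all i<j pairs of that list directly, eliminating A's membership scan of the growing result list inside the doubly-nested loop.
import Mathlib
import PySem

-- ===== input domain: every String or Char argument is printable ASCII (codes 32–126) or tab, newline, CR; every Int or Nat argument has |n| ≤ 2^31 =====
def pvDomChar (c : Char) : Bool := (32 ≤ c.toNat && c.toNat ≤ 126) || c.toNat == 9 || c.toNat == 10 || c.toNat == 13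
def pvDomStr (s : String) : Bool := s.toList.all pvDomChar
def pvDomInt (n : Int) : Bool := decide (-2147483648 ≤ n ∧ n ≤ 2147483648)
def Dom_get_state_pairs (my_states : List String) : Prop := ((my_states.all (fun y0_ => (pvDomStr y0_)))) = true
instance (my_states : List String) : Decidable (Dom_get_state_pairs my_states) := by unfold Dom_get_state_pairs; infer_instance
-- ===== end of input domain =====

-- B deduplicates the input once and then emits the i<j pairs of the distinct values
-- directly, removing A's membership scan of the growing result inside the nested loops.

-- ===== PORT A =====
-- body of A's inner `for ts in my_states` loop
def pvInnerStep (st : String) (state_pairs : List (List String)) (ts : String) : List (List String) :=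
  if ts == st then state_pairs
  else if state_pairs.contains [ts, st] || state_pairs.contains [st, ts] then state_pairs
  else state_pairs ++ [[st, ts]]

def get_state_pairs (my_states : List String) : List (List String) :=
  my_states.foldl (fun state_pairs st => my_states.foldl (pvInnerStep st) state_pairs) []

-- ===== PORT B =====
-- B's helper _pairs: all [head, y] pairs with y after head
def pvPairsOf : List String → List (List String)
  | [] => []
  | head :: rest => rest.map (fun y => [head, y]) ++ pvPairsOf rest

def get_state_pairs_alt (my_states : List String) : List (List String) :=
  pvPairsOf (my_states.foldl (fun unique x => if unique.contains x then unique else unique ++ [x]) [])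

-- ===== PRECONDITION & SPEC =====
def Spec_get_state_pairs (my_states : List String) (out : List (List String)) : Prop := out = get_state_pairs_alt my_states
instance (my_states : List String) (out : List (List String)) : Decidable (Spec_get_state_pairs my_states out) := by unfold Spec_get_state_pairs; infer_instance

-- ===== CLAIM (what is proved, stated in full; the proofs are below) =====
def Claim_equal_get_state_pairs : Prop := ∀ (my_states : List String), Dom_get_state_pairs my_states → Spec_get_state_pairs my_states (get_state_pairs my_states)

-- ===== LEMMAS AND PROOFS =====

-- dedup-with-accumulator: uAux S q appends to S the not-yet-seen values of q in order
def uAux (S : List String) (q : List String) : List String :=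
  q.foldl (fun unique x => if unique.contains x then unique else unique ++ [x]) S

-- the pairs produced once the first c distinct states have been fully processed by A's outer loop
def coPre : Nat → List String → List (List String)
  | _, [] => []
  | 0, _ => []
  | n+1, x :: xs => xs.map (fun y => [x, y]) ++ coPre n xs

theorem uAux_cons (S : List String) (x : String) (q : List String) :
    uAux S (x :: q) = uAux (if S.contains x then S else S ++ [x]) q := rfl

theorem uAux_append (S : List String) (q r : List String) :
    uAux S (q ++ r) = uAux (uAux S q) r := by
  simp [uAux, List.foldl_append]

theorem uAux_prefix (S : List String) (q : List String) : S <+: uAux S q := by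
  induction q generalizing S with
  | nil => exact List.prefix_refl S
  | cons a q ih =>
    rw [uAux_cons]
    by_cases h : S.contains a = true
    · rw [if_pos h]; exact ih S
    · rw [if_neg h]
      exact List.IsPrefix.trans ⟨[a], rfl⟩ (ih (S ++ [a]))

theorem uAux_mem (S : List String) (q : List String) (e : String) :
    e ∈ uAux S q ↔ e ∈ S ∨ e ∈ q := by
  induction q generalizing S with
  | nil => simp [uAux]
  | cons a q ih =>
    rw [uAux_cons]
    by_cases h : S.contains a = true
    · have ha : a ∈ S := by simpa using h
      rw [if_pos h, ih]
      constructor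
      · rintro (h1 | h1) <;> simp [h1]
      · rintro (h1 | h1)
        · exact Or.inl h1
        · rcases List.mem_cons.mp h1 with h2 | h2
          · exact Or.inl (h2 ▸ ha)
          · exact Or.inr h2
    · rw [if_neg h, ih]
      simp only [List.mem_append, List.mem_singleton, List.mem_cons]
      tauto

theorem uAux_nodup (S : List String) (q : List String) (hS : S.Nodup) : (uAux S q).Nodup := by
  induction q generalizing S with
  | nil => exact hS
  | cons a q ih =>
    rw [uAux_cons]
    by_cases h : S.contains a = true
    · rw [if_pos h]; exact ih S hS
    · rw [if_neg h]
      refine ih (S ++ [a]) ?_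
      have ha : a ∉ S := by simpa using h
      rw [List.nodup_append]
      refine ⟨hS, by simp, ?_⟩
      intro e he b hb
      simp only [List.mem_singleton] at hb
      subst hb
      exact fun hea => ha (hea ▸ he)

theorem nodup_append_single (S : List String) (t : String) (hS : S.Nodup) (ht : t ∉ S) :
    (S ++ [t]).Nodup := by
  rw [List.nodup_append]
  refine ⟨hS, by simp, ?_⟩
  intro e he b hb
  simp only [List.mem_singleton] at hb
  subst hb
  exact fun het => ht (het ▸ he)

theorem coPre_zero (U : List String) : coPre 0 U = [] := by
  cases U <;> rfl

-- membership characterisation of coPre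
theorem mem_coPre (U : List String) (hU : U.Nodup) (c : Nat) (a b : String) :
    [a, b] ∈ coPre c U ↔ a ∈ U ∧ b ∈ U ∧ List.idxOf a U < c ∧ List.idxOf a U < List.idxOf b U := by
  induction U generalizing c with
  | nil => cases c <;> simp [coPre]
  | cons u xs ih =>
    have hu : u ∉ xs := (List.nodup_cons.mp hU).1
    have hxs : xs.Nodup := (List.nodup_cons.mp hU).2
    cases c with
    | zero => simp [coPre_zero]
    | succ n =>
      simp only [coPre, List.mem_append, List.mem_map]
      constructor
      · rintro (⟨y, hy, hpair⟩ | hmem)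
        · have hax : a = u := by
            have := congrArg (fun l => l.headI) hpair
            simpa using this.symm
          have hby : b = y := by
            have := congrArg (fun l => l.tail.headI) hpair
            simpa using this.symm
          subst hax; subst hby
          have hbx : b ≠ a := fun h => hu (h ▸ hy)
          refine ⟨List.mem_cons_self .., List.mem_cons_of_mem _ hy, ?_, ?_⟩
          · rw [List.idxOf_cons_self]; omega
          · rw [List.idxOf_cons_self, List.idxOf_cons_ne _ (Ne.symm hbx)]; omega
        · rcases (ih hxs n).mp hmem with ⟨ha, hb, h1, h2⟩
          have hax : a ≠ u := fun h => hu (h ▸ ha)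
          have hbx : b ≠ u := fun h => hu (h ▸ hb)
          refine ⟨List.mem_cons_of_mem _ ha, List.mem_cons_of_mem _ hb, ?_, ?_⟩
          · rw [List.idxOf_cons_ne _ (Ne.symm hax)]; omega
          · rw [List.idxOf_cons_ne _ (Ne.symm hax), List.idxOf_cons_ne _ (Ne.symm hbx)]; omega
      · rintro ⟨ha, hb, h1, h2⟩
        by_cases hax : a = u
        · subst hax
          rw [List.idxOf_cons_self] at h2
          have hbx : b ≠ a := by
            intro h
            rw [h, List.idxOf_cons_self] at h2
            omega
          have hbxs : b ∈ xs := by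
            rcases List.mem_cons.mp hb with h | h
            · exact absurd h hbx
            · exact h
          exact Or.inl ⟨b, hbxs, rfl⟩
        · have haxs : a ∈ xs := by
            rcases List.mem_cons.mp ha with h | h
            · exact absurd h hax
            · exact h
          rw [List.idxOf_cons_ne _ (Ne.symm hax)] at h1 h2
          have hbx : b ≠ u := by
            intro h
            rw [h, List.idxOf_cons_self] at h2
            omega
          have hbxs : b ∈ xs := by
            rcases List.mem_cons.mp hb with h | h
            · exact absurd h hbx
            · exact h
          rw [List.idxOf_cons_ne _ (Ne.symm hbx)] at h2
          exact Or.inr ((ih hxs n).mpr ⟨haxs, hbxs, by omega, by omega⟩)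

-- filtering by index beyond c is dropping the first c+1 elements (for nodup lists)
theorem filter_idx_eq_drop (U : List String) (hU : U.Nodup) (c : Nat) :
    U.filter (fun v => decide (c < List.idxOf v U)) = U.drop (c + 1) := by
  induction U generalizing c with
  | nil => simp
  | cons x xs ih =>
    have hx : x ∉ xs := (List.nodup_cons.mp hU).1
    have hxs : xs.Nodup := (List.nodup_cons.mp hU).2
    rw [List.filter_cons]
    have hxidx : List.idxOf x (x :: xs) = 0 := List.idxOf_cons_self
    simp only [hxidx]
    have hcond : (decide (c < 0)) = false := by simp
    rw [hcond]
    have hcongr : xs.filter (fun v => decide (c < List.idxOf v (x :: xs)))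
        = xs.filter (fun v => decide (c < List.idxOf v xs + 1)) := by
      apply List.filter_congr
      intro v hv
      have hvx : v ≠ x := fun h => hx (h ▸ hv)
      rw [List.idxOf_cons_ne _ (Ne.symm hvx)]
    simp only [Bool.false_eq_true, if_false]
    rw [hcongr]
    cases c with
    | zero =>
      simp only [List.drop_succ_cons, List.drop_zero]
      apply List.filter_eq_self.mpr
      intro v _
      simp
    | succ n =>
      have : xs.filter (fun v => decide (n + 1 < List.idxOf v xs + 1))
          = xs.filter (fun v => decide (n < List.idxOf v xs)) := by
        apply List.filter_congr
        intro v _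
        simp only [decide_eq_decide]
        omega
      rw [List.drop_succ_cons, this, ih hxs n]

-- appending the next block: coPre (c+1) = coPre c ++ the pairs headed by U[c]
theorem coPre_succ (U : List String) (c : Nat) (h : c < U.length) :
    coPre (c + 1) U = coPre c U ++ (U.drop (c + 1)).map (fun y => [U[c], y]) := by
  induction U generalizing c with
  | nil => simp at h
  | cons x xs ih =>
    cases c with
    | zero => simp [coPre, coPre_zero]
    | succ n =>
      have hn : n < xs.length := by simpa using h
      simp only [coPre, List.drop_succ_cons, List.getElem_cons_succ]
      rw [ih n hn, List.append_assoc]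

theorem coPre_ge (U : List String) (c : Nat) (h : U.length ≤ c) :
    coPre c U = coPre U.length U := by
  induction U generalizing c with
  | nil => cases c <;> simp [coPre]
  | cons x xs ih =>
    cases c with
    | zero => simp at h
    | succ n =>
      simp only [coPre, List.length_cons]
      rw [ih n (by simpa using h)]

-- A's inner loop is a no-op when st's index is already below the processed count c
theorem inner_noop (U : List String) (hU : U.Nodup) (c : Nat) (x : String)
    (hx : x ∈ U) (hix : List.idxOf x U < c) (q : List String) (hq : ∀ e ∈ q, e ∈ U) :
    q.foldl (pvInnerStep x) (coPre c U) = coPre c U := by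
  induction q with
  | nil => rfl
  | cons ts q ih =>
    have hts : ts ∈ U := hq ts (List.mem_cons_self ..)
    have hq' : ∀ e ∈ q, e ∈ U := fun e he => hq e (List.mem_cons_of_mem _ he)
    rw [List.foldl_cons]
    have hstep : pvInnerStep x (coPre c U) ts = coPre c U := by
      unfold pvInnerStep
      by_cases heq : ts = x
      · simp [heq]
      · have hne : (ts == x) = false := by simp [heq]
        rw [hne]
        have hidx_ne : List.idxOf ts U ≠ List.idxOf x U := by
          intro h
          exact heq ((List.idxOf_inj hts).mp h)
        by_cases hlt : List.idxOf ts U < List.idxOf x U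
        · have hmem : [ts, x] ∈ coPre c U := (mem_coPre U hU c ts x).mpr ⟨hts, hx, by omega, hlt⟩
          have hcond : ((coPre c U).contains [ts, x] || (coPre c U).contains [x, ts]) = true := by
            simp only [Bool.or_eq_true, List.contains_iff_mem]
            exact Or.inl hmem
          rw [if_neg Bool.false_ne_true, if_pos hcond]
        · have hgt : List.idxOf x U < List.idxOf ts U := by omega
          have hmem : [x, ts] ∈ coPre c U := (mem_coPre U hU c x ts).mpr ⟨hx, hts, hix, hgt⟩
          have hcond : ((coPre c U).contains [ts, x] || (coPre c U).contains [x, ts]) = true := by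
            simp only [Bool.or_eq_true, List.contains_iff_mem]
            exact Or.inr hmem
          rw [if_neg Bool.false_ne_true, if_pos hcond]
    rw [hstep]
    exact ih hq'

-- A's inner loop when st is the c-th distinct state: it appends the pairs [st, v] for each
-- newly seen v of index > c, in first-occurrence order
theorem inner_step (U : List String) (hU : U.Nodup) (c : Nat) (x : String)
    (hx : x ∈ U) (hc : List.idxOf x U = c) (q : List String) :
    ∀ S : List String, S.Nodup → (∀ e ∈ S, e ∈ U) → (∀ e ∈ q, e ∈ U) →
    q.foldl (pvInnerStep x)
        (coPre c U ++ (S.filter (fun v => decide (c < List.idxOf v U))).map (fun v => [x, v]))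
      = coPre c U ++ ((uAux S q).filter (fun v => decide (c < List.idxOf v U))).map (fun v => [x, v]) := by
  induction q with
  | nil => intro S _ _ _; rfl
  | cons ts q ih =>
    intro S hS hSU hqU
    have hts : ts ∈ U := hqU ts (List.mem_cons_self ..)
    have hq' : ∀ e ∈ q, e ∈ U := fun e he => hqU e (List.mem_cons_of_mem _ he)
    rw [List.foldl_cons, uAux_cons]
    by_cases heq : ts = x
    · subst heq
      have hstep : pvInnerStep ts (coPre c U ++ (S.filter (fun v => decide (c < List.idxOf v U))).map (fun v => [ts, v])) ts
          = coPre c U ++ (S.filter (fun v => decide (c < List.idxOf v U))).map (fun v => [ts, v]) := by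
        unfold pvInnerStep; simp
      rw [hstep]
      by_cases hmem : S.contains ts
      · simp only [hmem, if_pos]
        exact ih S hS hSU hq'
      · simp only [hmem, Bool.false_eq_true, not_false_iff, ite_false]
        have hfilter : (S ++ [ts]).filter (fun v => decide (c < List.idxOf v U)) = S.filter (fun v => decide (c < List.idxOf v U)) := by
          rw [List.filter_append]
          have hnc : ¬ c < List.idxOf ts U := by omega
          have : [ts].filter (fun v => decide (c < List.idxOf v U)) = [] := by
            simp [List.filter_cons, hnc]
          rw [this, List.append_nil]
        have hS' : (S ++ [ts]).Nodup :=
          nodup_append_single S ts hS (by simpa using hmem)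
        have hSU' : ∀ e ∈ S ++ [ts], e ∈ U := by
          intro e he
          rcases List.mem_append.mp he with h | h
          · exact hSU e h
          · simp at h; exact h ▸ hx
        rw [← hfilter]
        exact ih (S ++ [ts]) hS' hSU' hq'
    · -- ts ≠ x
      have hne : (ts == x) = false := by simp [heq]
      have hidx_ne : List.idxOf ts U ≠ c := by
        intro h
        exact heq ((List.idxOf_inj hts).mp (h.trans hc.symm))
      set A0 := coPre c U ++ (S.filter (fun v => decide (c < List.idxOf v U))).map (fun v => [x, v]) with hA0
      by_cases hlt : List.idxOf ts U < c
      · -- [ts, x] already present in coPre c U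
        have hpair : [ts, x] ∈ A0 := by
          rw [hA0, List.mem_append]
          exact Or.inl ((mem_coPre U hU c ts x).mpr ⟨hts, hx, hlt, by omega⟩)
        have hstep : pvInnerStep x A0 ts = A0 := by
          unfold pvInnerStep
          rw [hne]
          have hcond : (A0.contains [ts, x] || A0.contains [x, ts]) = true := by
            simp only [Bool.or_eq_true, List.contains_iff_mem]
            exact Or.inl hpair
          rw [if_neg Bool.false_ne_true, if_pos hcond]
        rw [hstep]
        by_cases hmem : S.contains ts
        · simp only [hmem, if_pos]; exact ih S hS hSU hq'
        · simp only [hmem, Bool.false_eq_true, not_false_iff, ite_false]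
          have hfilter : (S ++ [ts]).filter (fun v => decide (c < List.idxOf v U)) = S.filter (fun v => decide (c < List.idxOf v U)) := by
            rw [List.filter_append]
            have hnc : ¬ c < List.idxOf ts U := by omega
            have : [ts].filter (fun v => decide (c < List.idxOf v U)) = [] := by
              simp [List.filter_cons, hnc]
            rw [this, List.append_nil]
          have hS' : (S ++ [ts]).Nodup :=
            nodup_append_single S ts hS (by simpa using hmem)
          have hSU' : ∀ e ∈ S ++ [ts], e ∈ U := by
            intro e he
            rcases List.mem_append.mp he with h | h
            · exact hSU e h
            · simp at h; exact h ▸ hts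
          rw [hA0, ← hfilter]
          exact ih (S ++ [ts]) hS' hSU' hq'
      · -- idxOf ts U > c
        have hgt : c < List.idxOf ts U := by omega
        by_cases hmem : S.contains ts
        · -- [x, ts] already present in the S-block
          have htsS : ts ∈ S := by simpa using hmem
          have hpair : [x, ts] ∈ A0 := by
            rw [hA0, List.mem_append]
            refine Or.inr (List.mem_map.mpr ⟨ts, ?_, rfl⟩)
            rw [List.mem_filter]
            exact ⟨htsS, by simpa using hgt⟩
          have hstep : pvInnerStep x A0 ts = A0 := by
            unfold pvInnerStep
            rw [hne]
            have hcond : (A0.contains [ts, x] || A0.contains [x, ts]) = true := by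
              simp only [Bool.or_eq_true, List.contains_iff_mem]
              exact Or.inr hpair
            rw [if_neg Bool.false_ne_true, if_pos hcond]
          rw [hstep]
          simp only [hmem, if_pos]
          exact ih S hS hSU hq'
        · -- genuinely new pair: append [x, ts]
          have htsS : ts ∉ S := by simpa using hmem
          have hpair1 : [ts, x] ∉ A0 := by
            rw [hA0, List.mem_append]
            rintro (h | h)
            · rcases (mem_coPre U hU c ts x).mp h with ⟨_, _, h1, _⟩; omega
            · rcases List.mem_map.mp h with ⟨v, _, hv⟩
              have : ts = x := by simpa using congrArg (fun l => l.headI) hv.symm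
              exact heq this
          have hpair2 : [x, ts] ∉ A0 := by
            rw [hA0, List.mem_append]
            rintro (h | h)
            · rcases (mem_coPre U hU c x ts).mp h with ⟨_, _, h1, _⟩
              rw [hc] at h1; omega
            · rcases List.mem_map.mp h with ⟨v, hv1, hv2⟩
              have hv : v = ts := by
                have := congrArg (fun l => l.tail.headI) hv2
                simpa using this
              exact htsS (hv ▸ (List.mem_filter.mp hv1).1)
          have hstep : pvInnerStep x A0 ts = A0 ++ [[x, ts]] := by
            unfold pvInnerStep
            rw [hne]
            have hcond : ¬ ((A0.contains [ts, x] || A0.contains [x, ts]) = true) := by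
              simp only [Bool.or_eq_true, List.contains_iff_mem]
              rintro (h | h)
              · exact hpair1 h
              · exact hpair2 h
            rw [if_neg Bool.false_ne_true, if_neg hcond]
          rw [hstep]
          simp only [hmem, Bool.false_eq_true, not_false_iff, ite_false]
          have hfilter : (S ++ [ts]).filter (fun v => decide (c < List.idxOf v U)) = S.filter (fun v => decide (c < List.idxOf v U)) ++ [ts] := by
            rw [List.filter_append]
            congr 1
            simp [List.filter_cons, hgt]
          have hrw : A0 ++ [[x, ts]] = coPre c U ++ ((S ++ [ts]).filter (fun v => decide (c < List.idxOf v U))).map (fun v => [x, v]) := by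
            rw [hfilter, hA0]
            simp
          rw [hrw]
          have hS' : (S ++ [ts]).Nodup := nodup_append_single S ts hS htsS
          have hSU' : ∀ e ∈ S ++ [ts], e ∈ U := by
            intro e he
            rcases List.mem_append.mp he with h | h
            · exact hSU e h
            · simp at h; exact h ▸ hts
          exact ih (S ++ [ts]) hS' hSU' hq'

-- the outer loop invariant
theorem outer_loop (l : List String) :
    ∀ (o p : List String) (c : Nat), p ++ o = l → uAux [] p = (uAux [] l).take c →
    c ≤ (uAux [] l).length →
    o.foldl (fun sp st => l.foldl (pvInnerStep st) sp) (coPre c (uAux [] l))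
      = coPre (uAux [] l).length (uAux [] l) := by
  intro o
  set U := uAux [] l with hUdef
  have hU : U.Nodup := uAux_nodup [] l (List.nodup_nil)
  have hlU : ∀ e ∈ l, e ∈ U := by
    intro e he
    rw [hUdef, uAux_mem]
    exact Or.inr he
  induction o with
  | nil =>
    intro p c hp hpc hcle
    have hpl : p = l := by simpa using hp
    subst hpl
    have : U = U.take c := by rw [hUdef] at hpc ⊢; exact hpc
    have hlen : U.length ≤ c := by
      by_contra hcon
      push_neg at hcon
      have := congrArg List.length this
      rw [List.length_take] at this
      omega
    rw [List.foldl_nil, coPre_ge U c hlen]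
  | cons x o ih =>
    intro p c hp hpc hcle
    have hxl : x ∈ l := by rw [← hp]; simp
    have hxU : x ∈ U := hlU x hxl
    rw [List.foldl_cons]
    have hp' : (p ++ [x]) ++ o = l := by simpa using hp
    by_cases hseen : (uAux [] p).contains x
    · -- x already processed: inner loop is a no-op
      have hxtake : x ∈ U.take c := by
        rw [← hpc]; simpa using hseen
      have hidx : List.idxOf x U < c := by
        have := (List.mem_take_iff_idxOf_lt hxU).mp hxtake
        omega
      rw [inner_noop U hU c x hxU hidx l hlU]
      have hpc' : uAux [] (p ++ [x]) = U.take c := by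
        rw [uAux_append, uAux_cons, if_pos hseen]
        exact hpc
      exact ih (p ++ [x]) c hp' hpc' hcle
    · -- x is the c-th distinct state
      have hux : uAux [] (p ++ [x]) = U.take c ++ [x] := by
        rw [uAux_append, uAux_cons, if_neg hseen]
        show uAux [] p ++ [x] = U.take c ++ [x]
        rw [hpc]
      have hprefix : uAux [] (p ++ [x]) <+: U := by
        have h1 : uAux [] ((p ++ [x]) ++ o) = uAux (uAux [] (p ++ [x])) o := uAux_append _ _ _
        rw [hp'] at h1
        rw [hUdef, h1]
        exact uAux_prefix _ _
      have hclen : c < U.length := by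
        have := hprefix.length_le
        rw [hux, List.length_append, List.length_take] at this
        simp at this
        omega
      have hgetc : U[c] = x := by
        rcases hprefix with ⟨t, ht⟩
        rw [hux] at ht
        have : U[c]? = some x := by
          rw [← ht]
          rw [List.getElem?_append_left (by simp [List.length_take]; try omega)]
          rw [List.getElem?_append_right (by simp [List.length_take]; try omega)]
          simp [List.length_take, Nat.min_eq_left (le_of_lt hclen)]
        simpa [List.getElem?_eq_getElem hclen] using this
      have hidxc : List.idxOf x U = c := by
        rw [← hgetc]
        exact hU.idxOf_getElem c hclen
      have hinner := inner_step U hU c x hxU hidxc l [] List.nodup_nil (by simp) hlU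
      simp only [List.filter_nil, List.map_nil, List.append_nil] at hinner
      rw [hinner]
      rw [← hUdef]
      rw [filter_idx_eq_drop U hU c]
      have hco : coPre c U ++ (U.drop (c + 1)).map (fun v => [x, v]) = coPre (c + 1) U := by
        rw [coPre_succ U c hclen, hgetc]
      rw [hco]
      have hpc' : uAux [] (p ++ [x]) = U.take (c + 1) := by
        rw [hux, List.take_succ, List.getElem?_eq_getElem hclen, hgetc]
        rfl
      exact ih (p ++ [x]) (c + 1) hp' hpc' (by omega)

-- B computes coPre over the full dedup list
theorem pvPairsOf_eq_coPre (U : List String) : pvPairsOf U = coPre U.length U := by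
  induction U with
  | nil => rfl
  | cons x xs ih => simp [pvPairsOf, coPre, ih]

-- ===== VERDICT (by name: the statement is the Claim_ definition above) =====
theorem get_state_pairs_spec : Claim_equal_get_state_pairs := by
  intro my_states _
  unfold Spec_get_state_pairs get_state_pairs get_state_pairs_alt
  rw [pvPairsOf_eq_coPre]
  have h := outer_loop my_states my_states [] 0 rfl rfl (Nat.zero_le _)
  rw [coPre_zero] at h
  exact h
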